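-- pv_equiv track=rewrite | github.com/wntic/uneex_python_course | Lecture6/1_PairNumber.py | count_unique_pairs
-- ===== SOURCE A (Python) =====
-- def count_unique_pairs(words: list[str]) -> int:
--     unique_pairs = set()
--
--     for i in range(len(words) - 1):
--         pair = tuple(sorted([words[i], words[i + 1]]))
--         if pair not in unique_pairs:
--             unique_pairs.add(pair)
--
--     pair = tuple(sorted([words[0], words[-1]]))
--     if pair not in unique_pairs:
--         unique_pairs.add(pair)
--
--     return len(unique_pairs)
-- ===== SOURCE B (Python) =====
-- def count_unique_pairs(words: list[str]) -> int:
--     pairs = [tuple(sorted((words[i], words[i + 1]))) for i in range(len(words) - 1)]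
--     pairs.append(tuple(sorted((words[0], words[-1]))))
--     pairs.sort()
--     count = 0
--     prev = None
--     for p in pairs:
--         if prev is None or p != prev:
--             count += 1
--             prev = p
--     return count
-- ===== Notes on version B (the rewrite author's own statement) =====
-- stated objective: alternative
-- what changed: Replaces the hash-set membership/insert loop by collecting all candidate pairs into a list, sorting it, and counting distinct pairs in one linear scan over adjacent elements.
import Mathlib
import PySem

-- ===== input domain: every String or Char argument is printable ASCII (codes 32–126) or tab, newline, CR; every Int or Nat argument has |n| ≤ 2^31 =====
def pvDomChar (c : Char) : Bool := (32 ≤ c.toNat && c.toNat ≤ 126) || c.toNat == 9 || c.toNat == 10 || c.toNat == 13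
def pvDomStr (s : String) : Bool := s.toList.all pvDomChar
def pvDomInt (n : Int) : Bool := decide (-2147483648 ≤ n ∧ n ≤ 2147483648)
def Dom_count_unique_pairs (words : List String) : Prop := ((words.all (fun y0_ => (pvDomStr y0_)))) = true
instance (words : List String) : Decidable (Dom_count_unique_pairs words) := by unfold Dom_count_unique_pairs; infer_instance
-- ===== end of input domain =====

-- B replaces A's hash-set membership loop by sort-then-scan: collect all candidate
-- pairs, sort them, count distinct pairs in one adjacent-comparison pass (alternative
-- decomposition, similar cost).


-- shared helper: 'tuple(sorted([a, b]))' on two strings; exact: a stable sort of the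
-- two-element list [a, b] puts b first iff b < a
def pvSortPair (a b : String) : String × String := if b < a then (b, a) else (a, b)

-- ===== PORT A =====
-- set-based: insert each adjacent pair (and the wrap pair) into a set, return its size;
-- words[i]/words[i+1]/words[0]/words[-1] via pyGetD (total form; in range under Pre_)
def count_unique_pairs (words : List String) : Int :=
  let s : PySem.Set (String × String) :=
    (PySem.List.pyRange 0 ((words.length : Int) - 1) 1).foldl
      (fun s i =>
        PySem.Set.add s
          (pvSortPair (PySem.List.pyGetD words i "") (PySem.List.pyGetD words (i + 1) "")))
      PySem.Set.empty
  let s := PySem.Set.add s (pvSortPair (PySem.List.pyGetD words 0 "") (PySem.List.pyGetD words (-1) ""))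
  PySem.Set.len s

-- ===== PORT B =====
-- sort-then-scan: list of all candidate pairs, pairs.sort() (tuple keys → sorted2),
-- then one pass counting entries that differ from the previous one
def count_unique_pairs_alt (words : List String) : Int :=
  let pairs : List (String × String) :=
    (PySem.List.pyRange 0 ((words.length : Int) - 1) 1).map
      (fun i => pvSortPair (PySem.List.pyGetD words i "") (PySem.List.pyGetD words (i + 1) ""))
  let pairs := pairs ++ [pvSortPair (PySem.List.pyGetD words 0 "") (PySem.List.pyGetD words (-1) "")]
  let sp := PySem.List.sorted2 pairs Prod.fst Prod.snd
  let st := sp.foldl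
    (fun (st : Int × Option (String × String)) p =>
      if st.2 = none ∨ st.2 ≠ some p then (st.1 + 1, some p) else st)
    ((0 : Int), none)
  st.1

-- ===== PRECONDITION & SPEC =====
-- Pre_ excludes only the empty list, on which A's words[0] raises IndexError
def Pre_count_unique_pairs (words : List String) : Prop := words ≠ []
instance (words : List String) : Decidable (Pre_count_unique_pairs words) := by unfold Pre_count_unique_pairs; infer_instance
def pvWitness_count_unique_pairs : List String := (["ab", "c", "ab"])

def Spec_count_unique_pairs (words : List String) (out : Int) : Prop := out = count_unique_pairs_alt words
instance (words : List String) (out : Int) : Decidable (Spec_count_unique_pairs words out) := by unfold Spec_count_unique_pairs; infer_instance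

-- ===== CLAIM (what is proved, stated in full; the proofs are below) =====
def Claim_equal_count_unique_pairs : Prop := ∀ (words : List String), Dom_count_unique_pairs words → Pre_count_unique_pairs words → Spec_count_unique_pairs words (count_unique_pairs words)

-- ===== LEMMAS AND PROOFS =====

-- the common candidate-pair list both programs process
def pvPairs (words : List String) : List (String × String) :=
  (PySem.List.pyRange 0 ((words.length : Int) - 1) 1).map
    (fun i => pvSortPair (PySem.List.pyGetD words i "") (PySem.List.pyGetD words (i + 1) ""))
  ++ [pvSortPair (PySem.List.pyGetD words 0 "") (PySem.List.pyGetD words (-1) "")]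

-- A is the size of set(pvPairs words)
lemma count_unique_pairs_eq_ofList (words : List String) :
    count_unique_pairs words = ((PySem.Set.ofList (pvPairs words)).length : Int) := by
  simp [count_unique_pairs, pvPairs, PySem.Set.ofList_eq_foldl, List.foldl_append,
    List.foldl_map, PySem.Set.len]

-- |set(l)| = number of distinct elements of l
lemma ofList_length_eq_card (l : List (String × String)) :
    (PySem.Set.ofList l).length = l.toFinset.card := by
  have hfs : (PySem.Set.ofList l).toFinset = l.toFinset := by
    ext x; simp [List.mem_toFinset, PySem.Set.mem_ofList]
  rw [← List.toFinset_card_of_nodup (PySem.Set.nodup_ofList l), hfs]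

-- Python's tuple sort = sort by the lexicographic key
lemma sorted2_eq_sorted_toLex (l : List (String × String)) :
    PySem.List.sorted2 l Prod.fst Prod.snd
      = PySem.List.sorted l (fun x => toLex x) := by
  show List.foldl _ [] l = List.foldl _ [] l
  have hbefore : (fun a b : String × String =>
        decide (a.1 < b.1) || (!decide (b.1 < a.1) && decide (a.2 < b.2)))
      = fun a b : String × String => decide (toLex a < toLex b) := by
    funext a b
    rw [Bool.eq_iff_iff]
    simp only [Bool.or_eq_true, Bool.and_eq_true, Bool.not_eq_true', decide_eq_true_eq,
      decide_eq_false_iff_not, Prod.Lex.toLex_lt_toLex]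
    constructor
    · rintro (h | ⟨h1, h2⟩)
      · exact Or.inl h
      · rcases lt_trichotomy a.1 b.1 with h' | h' | h'
        · exact Or.inl h'
        · exact Or.inr ⟨h', h2⟩
        · exact absurd h' h1
    · rintro (h | ⟨h1, h2⟩)
      · exact Or.inl h
      · exact Or.inr ⟨by rw [h1]; exact lt_irrefl _, h2⟩
  rw [hbefore]

-- the scan step of B
def pvStep (st : Int × Option (String × String)) (p : String × String) :
    Int × Option (String × String) :=
  if st.2 = none ∨ st.2 ≠ some p then (st.1 + 1, some p) else st

lemma scan_aux (l : List (String × String)) :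
    ∀ (a : String × String) (c : Int),
    List.Pairwise (fun x y : String × String => toLex x ≤ toLex y) (a :: l) →
    (l.foldl pvStep (c, some a)).1 = c + ((a :: l).toFinset.card : Int) - 1 := by
  induction l with
  | nil => intro a c _; simp
  | cons x t ih =>
    intro a c h
    rw [List.pairwise_cons] at h
    obtain ⟨ha, hxt⟩ := h
    by_cases hax : a = x
    · subst hax
      have h' : List.Pairwise (fun x y : String × String => toLex x ≤ toLex y) (a :: t) := by
        rw [List.pairwise_cons]
        exact ⟨fun b hb => (List.pairwise_cons.mp hxt).1 b hb, (List.pairwise_cons.mp hxt).2⟩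
      have hstep : pvStep (c, some a) a = (c, some a) := by simp [pvStep]
      rw [List.foldl_cons, hstep, ih a c h']
      congr 2
      simp [List.toFinset_cons]
    · have hstep : pvStep (c, some a) x = (c + 1, some x) := by
        simp [pvStep, Option.some.injEq]
        intro h'; exact absurd h' hax
      have hnotmem : a ∉ (x :: t) := by
        intro hmem
        rcases List.mem_cons.mp hmem with h' | h'
        · exact hax h'
        · have h1 : toLex a ≤ toLex x := ha x (List.mem_cons_self)
          have h2 : toLex x ≤ toLex a := by
            have := (List.pairwise_cons.mp hxt).1 a h'
            exact this
          have : toLex a = toLex x := le_antisymm h1 h2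
          exact hax (toLex.injective this)
      have := ih x (c + 1) hxt
      simp only [List.foldl_cons, hstep, this]
      have hcard : ((a :: x :: t).toFinset.card : Int) = ((x :: t).toFinset.card : Int) + 1 := by
        rw [List.toFinset_cons, Finset.card_insert_of_notMem (by simpa using hnotmem)]
        push_cast; ring
      rw [hcard]; ring

lemma scan_sorted (l : List (String × String))
    (h : List.Pairwise (fun x y : String × String => toLex x ≤ toLex y) l) :
    (l.foldl pvStep ((0 : Int), none)).1 = (l.toFinset.card : Int) := by
  cases l with
  | nil => simp
  | cons a t =>
    have hstep : pvStep ((0 : Int), none) a = (1, some a) := by simp [pvStep]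
    rw [List.foldl_cons, hstep, scan_aux t a 1 h]
    have : 0 < (a :: t).toFinset.card := by
      apply Finset.card_pos.mpr
      exact ⟨a, by simp⟩
    omega

lemma perm_toFinset {l l' : List (String × String)} (h : l.Perm l') :
    l.toFinset = l'.toFinset := by
  ext x; simp [List.mem_toFinset, h.mem_iff]

lemma count_unique_pairs_alt_eq_card (words : List String) :
    count_unique_pairs_alt words = ((pvPairs words).toFinset.card : Int) := by
  show ((PySem.List.sorted2 (pvPairs words) Prod.fst Prod.snd).foldl pvStep ((0:Int), none)).1
      = ((pvPairs words).toFinset.card : Int)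
  rw [sorted2_eq_sorted_toLex]
  rw [scan_sorted _ (PySem.List.sorted_pairwise (pvPairs words) (fun x => toLex x))]
  rw [perm_toFinset (PySem.List.sorted_perm (pvPairs words) (fun x => toLex x) false)]

-- ===== VERDICT (by name: the statement is the Claim_ definition above) =====
theorem count_unique_pairs_spec : Claim_equal_count_unique_pairs := by
  intro words _ _
  unfold Spec_count_unique_pairs
  rw [count_unique_pairs_eq_ofList, count_unique_pairs_alt_eq_card, ofList_length_eq_card]
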